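-- pv_equiv track=rewrite | github.com/harshvardhanraju/next_click_predictor | cloudrun_app_simple.py | determine_element_from_task
-- ===== SOURCE A (Python) =====
-- def determine_element_from_task(task: str) -> tuple:
--     """Determine element type and text based on task description"""
--     task_lower = task.lower()
--
--     # Common patterns
--     if any(word in task_lower for word in ['buy', 'purchase', 'checkout', 'pay']):
--         return "button", "Buy Now"
--     elif any(word in task_lower for word in ['login', 'sign in', 'log in']):
--         return "button", "Sign In"
--     elif any(word in task_lower for word in ['register', 'sign up', 'signup']):
--         return "button", "Sign Up"
--     elif any(word in task_lower for word in ['search', 'find', 'look']):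
--         return "form", "Search"
--     elif any(word in task_lower for word in ['continue', 'next', 'proceed']):
--         return "button", "Continue"
--     elif any(word in task_lower for word in ['submit', 'send', 'save']):
--         return "button", "Submit"
--     elif any(word in task_lower for word in ['close', 'cancel', 'back']):
--         return "button", "Close"
--     else:
--         return "button", "Click Here"
-- ===== SOURCE B (Python) =====
-- KEYWORD_PRIORITY = {
--     'buy': 0, 'purchase': 0, 'checkout': 0, 'pay': 0,
--     'login': 1, 'sign in': 1, 'log in': 1,
--     'register': 2, 'sign up': 2, 'signup': 2,
--     'search': 3, 'find': 3, 'look': 3,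
--     'continue': 4, 'next': 4, 'proceed': 4,
--     'submit': 5, 'send': 5, 'save': 5,
--     'close': 6, 'cancel': 6, 'back': 6,
-- }
-- RESULTS = [
--     ("button", "Buy Now"), ("button", "Sign In"), ("button", "Sign Up"),
--     ("form", "Search"), ("button", "Continue"), ("button", "Submit"),
--     ("button", "Close"), ("button", "Click Here"),
-- ]
--
-- def determine_element_from_task(task: str) -> tuple:
--     task_lower = task.lower()
--     best = min((p for kw, p in KEYWORD_PRIORITY.items() if kw in task_lower),
--                default=len(RESULTS) - 1)
--     return RESULTS[best]
-- ===== Notes on version B (the rewrite author's own statement) =====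
-- stated objective: alternative
-- what changed: Instead of short-circuiting through grouped if-elif checks, B flattens the rules into a keyword-to-priority map, scans ALL keywords collecting the priorities of every match, and aggregates with min (default = fallback priority), then indexes a result table.
import Mathlib
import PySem

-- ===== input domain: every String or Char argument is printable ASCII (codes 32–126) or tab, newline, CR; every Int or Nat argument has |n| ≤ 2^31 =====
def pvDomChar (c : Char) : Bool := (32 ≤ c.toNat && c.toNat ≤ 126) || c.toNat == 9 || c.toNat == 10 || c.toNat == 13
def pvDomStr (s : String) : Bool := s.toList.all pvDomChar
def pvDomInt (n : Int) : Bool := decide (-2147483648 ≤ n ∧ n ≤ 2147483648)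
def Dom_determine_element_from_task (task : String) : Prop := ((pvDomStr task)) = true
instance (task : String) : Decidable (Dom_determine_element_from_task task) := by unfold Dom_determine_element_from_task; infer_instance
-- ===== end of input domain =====

-- B flattens the rules into a keyword→priority map, collects the priorities of ALL matching
-- keywords and aggregates with min (alternative decomposition; same cost).

-- ===== PORT A =====
def determine_element_from_task (task : String) : String × String :=
  let task_lower := PySem.Str.lower task
  if (["buy", "purchase", "checkout", "pay"].any (fun w => PySem.Str.isIn w task_lower)) then
    ("button", "Buy Now")
  else if (["login", "sign in", "log in"].any (fun w => PySem.Str.isIn w task_lower)) then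
    ("button", "Sign In")
  else if (["register", "sign up", "signup"].any (fun w => PySem.Str.isIn w task_lower)) then
    ("button", "Sign Up")
  else if (["search", "find", "look"].any (fun w => PySem.Str.isIn w task_lower)) then
    ("form", "Search")
  else if (["continue", "next", "proceed"].any (fun w => PySem.Str.isIn w task_lower)) then
    ("button", "Continue")
  else if (["submit", "send", "save"].any (fun w => PySem.Str.isIn w task_lower)) then
    ("button", "Submit")
  else if (["close", "cancel", "back"].any (fun w => PySem.Str.isIn w task_lower)) then
    ("button", "Close")
  else
    ("button", "Click Here")

-- ===== PORT B =====
-- the KEYWORD_PRIORITY dict (insertion order) as an association list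
def pvKEYWORD_PRIORITY : List (String × Nat) :=
  [ ("buy", 0), ("purchase", 0), ("checkout", 0), ("pay", 0),
    ("login", 1), ("sign in", 1), ("log in", 1),
    ("register", 2), ("sign up", 2), ("signup", 2),
    ("search", 3), ("find", 3), ("look", 3),
    ("continue", 4), ("next", 4), ("proceed", 4),
    ("submit", 5), ("send", 5), ("save", 5),
    ("close", 6), ("cancel", 6), ("back", 6) ]

def pvRESULTS : List (String × String) :=
  [ ("button", "Buy Now"), ("button", "Sign In"), ("button", "Sign Up"),
    ("form", "Search"), ("button", "Continue"), ("button", "Submit"),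
    ("button", "Close"), ("button", "Click Here") ]

def determine_element_from_task_alt (task : String) : String × String :=
  let task_lower := PySem.Str.lower task
  -- best = min((p for kw, p in KEYWORD_PRIORITY.items() if kw in task_lower), default=len(RESULTS)-1)
  let best : Nat :=
    (PySem.List.min?
        ((pvKEYWORD_PRIORITY.filter (fun kp => PySem.Str.isIn kp.1 task_lower)).map Prod.snd)
        (fun p => p)).getD (pvRESULTS.length - 1)
  -- RESULTS[best]: best ≤ len(RESULTS)-1 always, so pyGet? is some and the getD default is unreachable
  (PySem.List.pyGet? pvRESULTS (best : Int)).getD ("button", "Click Here")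

-- ===== PRECONDITION & SPEC =====
def Spec_determine_element_from_task (task : String) (out : String × String) : Prop := out = determine_element_from_task_alt task
instance (task : String) (out : String × String) : Decidable (Spec_determine_element_from_task task out) := by unfold Spec_determine_element_from_task; infer_instance

-- ===== CLAIM (what is proved, stated in full; the proofs are below) =====
def Claim_equal_determine_element_from_task : Prop := ∀ (task : String), Dom_determine_element_from_task task → Spec_determine_element_from_task task (determine_element_from_task task)

-- ===== LEMMAS AND PROOFS =====

theorem pv_foldl_min_of_le (i : Nat) (xs : List Nat) (h : ∀ x ∈ xs, i ≤ x) :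
    xs.foldl min i = i := by
  induction xs with
  | nil => rfl
  | cons x xs ih =>
      have hx : min i x = i := Nat.min_eq_left (h x (by simp))
      simpa [hx] using ih (fun y hy => h y (by simp [hy]))

theorem pv_minD_cons_of_le (i : Nat) (xs : List Nat) (d : Nat) (h : ∀ x ∈ xs, i ≤ x) :
    (PySem.List.min? (i :: xs) (fun p => p)).getD d = i := by
  rw [PySem.List.min?_id_cons]
  simp [pv_foldl_min_of_le i xs h]

-- one rule group at a time: the min over the filtered flat table peels off as A's chain step
theorem pv_minD_group (P : String → Bool) (ws : List String) (i : Nat)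
    (rest : List (String × Nat)) (d : Nat)
    (hrest : ∀ kp ∈ rest, i ≤ kp.2) :
    (PySem.List.min?
        (((ws.map (fun w => (w, i)) ++ rest).filter (fun kp => P kp.1)).map Prod.snd)
        (fun p => p)).getD d
      = if ws.any P then i
        else (PySem.List.min? ((rest.filter (fun kp => P kp.1)).map Prod.snd) (fun p => p)).getD d := by
  induction ws with
  | nil => simp
  | cons w ws ih =>
      by_cases hw : P w
      · have htail : ∀ x ∈ ((ws.map (fun w => (w, i)) ++ rest).filter (fun kp => P kp.1)).map Prod.snd, i ≤ x := by
          intro x hx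
          rcases List.mem_map.1 hx with ⟨kp, hkp, rfl⟩
          rcases List.mem_append.1 (List.mem_filter.1 hkp).1 with hkw | hr
          · rcases List.mem_map.1 hkw with ⟨w', _, rfl⟩; exact le_refl i
          · exact hrest kp hr
        simp only [List.map_cons, List.cons_append, List.filter_cons, hw, List.any_cons,
          Bool.true_or, if_true]
        exact pv_minD_cons_of_le i _ d htail
      · simp only [List.map_cons, List.cons_append, List.filter_cons, hw, List.any_cons,
          Bool.false_or]
        simpa using ih

theorem pv_main (P : String → Bool) :
    (if (["buy", "purchase", "checkout", "pay"].any P) then ("button", "Buy Now")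
     else if (["login", "sign in", "log in"].any P) then ("button", "Sign In")
     else if (["register", "sign up", "signup"].any P) then ("button", "Sign Up")
     else if (["search", "find", "look"].any P) then ("form", "Search")
     else if (["continue", "next", "proceed"].any P) then ("button", "Continue")
     else if (["submit", "send", "save"].any P) then ("button", "Submit")
     else if (["close", "cancel", "back"].any P) then ("button", "Close")
     else ("button", "Click Here"))
    = (PySem.List.pyGet? pvRESULTS
        (((PySem.List.min?
            ((pvKEYWORD_PRIORITY.filter (fun kp => P kp.1)).map Prod.snd)
            (fun p => p)).getD (pvRESULTS.length - 1) : Nat) : Int)).getD ("button", "Click Here") := by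
  have e0 : pvKEYWORD_PRIORITY
      = (["buy", "purchase", "checkout", "pay"].map (fun w => (w, (0:Nat)))) ++
        ((["login", "sign in", "log in"].map (fun w => (w, (1:Nat)))) ++
         ((["register", "sign up", "signup"].map (fun w => (w, (2:Nat)))) ++
          ((["search", "find", "look"].map (fun w => (w, (3:Nat)))) ++
           ((["continue", "next", "proceed"].map (fun w => (w, (4:Nat)))) ++
            ((["submit", "send", "save"].map (fun w => (w, (5:Nat)))) ++
             ((["close", "cancel", "back"].map (fun w => (w, (6:Nat)))) ++ ([] : List (String × Nat)))))))) := by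
    rfl
  rw [e0]
  rw [pv_minD_group P _ 0 _ _ (by decide)]
  rw [pv_minD_group P _ 1 _ _ (by decide)]
  rw [pv_minD_group P _ 2 _ _ (by decide)]
  rw [pv_minD_group P _ 3 _ _ (by decide)]
  rw [pv_minD_group P _ 4 _ _ (by decide)]
  rw [pv_minD_group P _ 5 _ _ (by decide)]
  rw [pv_minD_group P _ 6 _ _ (by decide)]
  simp only [List.filter_nil, List.map_nil]
  split_ifs <;> rfl

-- ===== VERDICT (by name: the statement is the Claim_ definition above) =====
theorem determine_element_from_task_spec : Claim_equal_determine_element_from_task := by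
  intro task _
  exact pv_main (fun w => PySem.Str.isIn w (PySem.Str.lower task))
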